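-- pv_equiv track=rewrite | github.com/jwagner-kfcu/SamanageTasksETL | SamanageTaskETL.py | stripnewline
-- ===== SOURCE A (Python) =====
-- def stripnewline(inputstring):
--     if inputstring is not None:
--         if inputstring != "":
--             outputstring = ""
--             for string in inputstring.splitlines():
--                 outputstring = outputstring + " " + string
--
--             return inputstring.replace(',', ' ').replace(':', ' ').replace('/', ' ').replace('"', ' ') \
--                 .replace('|', ' ').lstrip().rstrip()
--         return ''
--     return ''
-- ===== SOURCE B (Python) =====
-- def stripnewline(inputstring):
--     if inputstring is None or inputstring == "":
--         return ""
--     parts = [inputstring]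
--     for sep in ',:/"|':
--         parts = [piece for part in parts for piece in part.split(sep)]
--     return " ".join(parts).strip()
-- ===== Notes on version B (the rewrite author's own statement) =====
-- stated objective: alternative
-- what changed: B tokenizes: it maintains a list of fragments, splitting it successively on each of the five punctuation characters, then rejoins the fragments with single spaces and strips once, instead of A's dead line-joining loop plus five in-place .replace() scans over one string.
import Mathlib
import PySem

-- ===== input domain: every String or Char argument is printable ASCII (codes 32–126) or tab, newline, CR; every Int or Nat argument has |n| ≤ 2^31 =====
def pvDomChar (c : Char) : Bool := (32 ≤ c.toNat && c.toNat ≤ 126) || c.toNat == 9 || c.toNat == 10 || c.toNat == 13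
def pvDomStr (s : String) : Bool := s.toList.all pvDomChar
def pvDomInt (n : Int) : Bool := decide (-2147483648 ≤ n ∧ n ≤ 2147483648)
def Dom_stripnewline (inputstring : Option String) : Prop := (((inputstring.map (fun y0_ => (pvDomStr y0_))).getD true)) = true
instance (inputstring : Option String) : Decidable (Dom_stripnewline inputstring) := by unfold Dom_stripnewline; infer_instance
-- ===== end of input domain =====

-- B tokenizes into a fragment list by successive splits on the five punctuation
-- characters, then rejoins with spaces and strips once, instead of A's dead
-- line-joining loop plus five chained .replace() scans (alternative decomposition).


-- ===== PORT A =====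
def stripnewline (inputstring : Option String) : String :=
  match inputstring with
  | some s =>
    if s ≠ "" then
      -- dead accumulator loop from A (its result is never used)
      let _outputstring := (PySem.Str.splitlines s).foldl (fun acc str => acc ++ " " ++ str) ""
      PySem.Str.rstrip (PySem.Str.lstrip
        (PySem.Str.replace (PySem.Str.replace (PySem.Str.replace (PySem.Str.replace
          (PySem.Str.replace s "," " ") ":" " ") "/" " ") "\"" " ") "|" " "))
    else ""
  | none => ""

-- ===== PORT B =====
def pvSeps : List Char := [',', ':', '/', '"', '|']

def stripnewline_alt (inputstring : Option String) : String :=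
  match inputstring with
  | none => ""
  | some s =>
    if s = "" then ""
    else
      let parts := pvSeps.foldl
        (fun parts sep => parts.flatMap (fun part => PySem.Chars.splitOn part [sep]))
        [s.toList]
      String.ofList (PySem.Chars.strip (PySem.Chars.join [' '] parts))

-- ===== PRECONDITION & SPEC =====
def Spec_stripnewline (inputstring : Option String) (out : String) : Prop := out = stripnewline_alt inputstring
instance (inputstring : Option String) (out : String) : Decidable (Spec_stripnewline inputstring out) := by unfold Spec_stripnewline; infer_instance

-- ===== CLAIM =====
def Claim_equal_stripnewline : Prop := ∀ (inputstring : Option String), Dom_stripnewline inputstring → Spec_stripnewline inputstring (stripnewline inputstring)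

-- ===== LEMMAS AND PROOFS =====

-- single-character replace is a map
theorem replace_go_single (o n : Char) :
    ∀ (l acc : List Char) (fuel : Nat), l.length ≤ fuel →
      PySem.Chars.replace.go [o] [n] fuel l acc
        = acc.reverse ++ l.map (fun c => if c = o then n else c) := by
  intro l
  induction l with
  | nil =>
      intro acc fuel _
      cases fuel <;> simp [PySem.Chars.replace.go]
  | cons c t ih =>
      intro acc fuel hf
      cases fuel with
      | zero => simp at hf
      | succ fuel =>
        simp only [PySem.Chars.replace.go]
        by_cases h : c = o
        · subst h
          rw [if_pos (by simp [List.isPrefixOf])]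
          simp only [List.length_cons, List.length_nil, List.drop_succ_cons, List.drop_zero]
          rw [ih ([n].reverse ++ acc) fuel (by simpa using hf)]
          simp
        · rw [if_neg (by simp [List.isPrefixOf]; exact fun he => h he.symm)]
          rw [ih (c :: acc) fuel (by simpa using hf)]
          simp only [List.map_cons, if_neg h, List.reverse_cons, List.append_assoc,
            List.cons_append, List.nil_append]

theorem replace_single (o n : Char) (l : List Char) :
    PySem.Chars.replace l [o] [n] = l.map (fun c => if c = o then n else c) := by
  simp only [PySem.Chars.replace, List.isEmpty_cons]
  rw [if_neg (by simp)]
  simpa using replace_go_single o n l [] l.length le_rfl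

-- pure version of split on a single separator
def pvModHead (p : List Char) : List (List Char) → List (List Char)
  | [] => [p]
  | s :: r => (p ++ s) :: r

def pvSp (o : Char) : List Char → List (List Char)
  | [] => [[]]
  | c :: t => if c = o then [] :: pvSp o t else pvModHead [c] (pvSp o t)

theorem pvSp_ne_nil (o : Char) (l : List Char) : pvSp o l ≠ [] := by
  cases l with
  | nil => simp [pvSp]
  | cons c t =>
      simp only [pvSp]
      split_ifs
      · simp
      · cases h : pvSp o t <;> simp [pvModHead]

theorem pvModHead_nil (xs : List (List Char)) (h : xs ≠ []) : pvModHead [] xs = xs := by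
  cases xs with
  | nil => exact absurd rfl h
  | cons s r => simp [pvModHead]

theorem pvModHead_modHead (p q : List Char) (xs : List (List Char)) :
    pvModHead p (pvModHead q xs) = pvModHead (p ++ q) xs := by
  cases xs <;> simp [pvModHead]

theorem splitOn_go_single (o : Char) :
    ∀ (fuel : Nat) (l cur : List Char) (out : List (List Char)), l.length < fuel →
      PySem.Chars.splitOn.go [o] fuel l cur out
        = out.reverse ++ pvModHead cur.reverse (pvSp o l) := by
  intro fuel
  induction fuel with
  | zero => intro l cur out h; omega
  | succ fuel ih =>
      intro l cur out h
      cases l with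
      | nil => simp [PySem.Chars.splitOn.go, pvSp, pvModHead]
      | cons c t =>
          simp only [PySem.Chars.splitOn.go]
          by_cases hc : c = o
          · subst hc
            rw [if_pos (by simp [List.isPrefixOf])]
            simp only [List.length_cons, List.length_nil, List.drop_succ_cons, List.drop_zero]
            rw [ih t [] (cur.reverse :: out) (by simpa using Nat.lt_of_succ_lt_succ h)]
            simp only [List.reverse_nil, pvModHead_nil _ (pvSp_ne_nil c t)]
            simp [pvSp, pvModHead]
          · rw [if_neg (by simp [List.isPrefixOf]; exact fun he => hc he.symm)]
            rw [ih t (c :: cur) out (by simpa using Nat.lt_of_succ_lt_succ h)]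
            simp [pvSp, if_neg hc, pvModHead_modHead]

theorem splitOn_single (o : Char) (l : List Char) :
    PySem.Chars.splitOn l [o] = pvSp o l := by
  have := splitOn_go_single o (l.length + 1) l [] [] (Nat.lt_succ_self _)
  simpa [PySem.Chars.splitOn, pvModHead_nil _ (pvSp_ne_nil o l)] using this

-- joining the single-separator split with a space = replacing that char by a space
theorem join_sp (o : Char) (l : List Char) :
    PySem.Chars.join [' '] (pvSp o l) = l.map (fun c => if c = o then ' ' else c) := by
  induction l with
  | nil => simp [pvSp, PySem.Chars.join_singleton]
  | cons c t ih =>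
      obtain ⟨s, r, hs⟩ := List.exists_cons_of_ne_nil (pvSp_ne_nil o t)
      rw [hs] at ih
      by_cases hc : c = o
      · subst hc
        have h1 : pvSp c (c :: t) = [] :: s :: r := by rw [← hs]; simp [pvSp]
        rw [h1, PySem.Chars.join_cons_cons, ih]
        simp
      · have h1 : pvSp o (c :: t) = (c :: s) :: r := by
          rw [show pvSp o (c :: t) = pvModHead [c] (pvSp o t) from by simp [pvSp, hc], hs]
          rfl
        rw [h1]
        cases r with
        | nil =>
            rw [PySem.Chars.join_singleton] at ih
            rw [PySem.Chars.join_singleton]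
            simp [if_neg hc, ih]
        | cons q r' =>
            rw [PySem.Chars.join_cons_cons] at ih
            rw [PySem.Chars.join_cons_cons]
            simpa [if_neg hc, List.cons_append, List.append_assoc] using congrArg (c :: ·) ih

theorem join_append_ne_nil (a b : List (List Char)) (ha : a ≠ []) (hb : b ≠ []) :
    PySem.Chars.join [' '] (a ++ b)
      = PySem.Chars.join [' '] a ++ ' ' :: PySem.Chars.join [' '] b := by
  induction a with
  | nil => exact absurd rfl ha
  | cons x a' ih =>
      cases a' with
      | nil =>
          obtain ⟨y, r, hy⟩ := List.exists_cons_of_ne_nil hb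
          subst hy
          simp [PySem.Chars.join_cons_cons, PySem.Chars.join_singleton]
      | cons z a'' =>
          have h2 : (x :: z :: a'') ++ b = x :: ((z :: a'') ++ b) := rfl
          have h3 : (z :: a'') ++ b = z :: (a'' ++ b) := rfl
          rw [h2, h3, PySem.Chars.join_cons_cons, ← h3, ih (by simp),
            PySem.Chars.join_cons_cons]
          simp [List.append_assoc]

theorem flatMap_splitOn_ne_nil (o : Char) (ts : List (List Char)) (h : ts ≠ []) :
    ts.flatMap (fun p => PySem.Chars.splitOn p [o]) ≠ [] := by
  obtain ⟨t, r, ht⟩ := List.exists_cons_of_ne_nil h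
  subst ht
  simp only [List.flatMap_cons, splitOn_single]
  exact fun hEq => pvSp_ne_nil o t (List.append_eq_nil_iff.mp hEq).1

-- one splitting stage commutes with joining: it is the single-char replace on the join
theorem join_stage (o : Char) (ts : List (List Char)) (h : ts ≠ []) :
    PySem.Chars.join [' '] (ts.flatMap (fun p => PySem.Chars.splitOn p [o]))
      = (PySem.Chars.join [' '] ts).map (fun c => if c = o then ' ' else c) := by
  induction ts with
  | nil => exact absurd rfl h
  | cons t ts' ih =>
      cases ts' with
      | nil => simp [splitOn_single, join_sp, PySem.Chars.join_singleton]
      | cons u r =>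
          have hne : (u :: r : List (List Char)) ≠ [] := by simp
          rw [List.flatMap_cons, splitOn_single,
            join_append_ne_nil _ _ (pvSp_ne_nil o t) (flatMap_splitOn_ne_nil o (u :: r) hne),
            join_sp, ih hne, PySem.Chars.join_cons_cons]
          simp [List.map_append]

-- ===== VERDICT =====
theorem stripnewline_spec : Claim_equal_stripnewline := by
  intro inputstring _
  unfold Spec_stripnewline
  match inputstring with
  | none => rfl
  | some s =>
    simp only [stripnewline, stripnewline_alt]
    by_cases hs : s = ""
    · simp [hs]
    · rw [if_pos hs, if_neg hs]
      have hfold :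
          PySem.Chars.join [' '] (pvSeps.foldl
            (fun parts sep => parts.flatMap (fun part => PySem.Chars.splitOn part [sep]))
            [s.toList])
          = ((((s.toList.map (fun c => if c = ',' then ' ' else c)).map
              (fun c => if c = ':' then ' ' else c)).map
              (fun c => if c = '/' then ' ' else c)).map
              (fun c => if c = '"' then ' ' else c)).map
              (fun c => if c = '|' then ' ' else c) := by
        simp only [pvSeps, List.foldl_cons, List.foldl_nil]
        rw [join_stage '|' _ (flatMap_splitOn_ne_nil '"' _ (flatMap_splitOn_ne_nil '/' _
              (flatMap_splitOn_ne_nil ':' _ (flatMap_splitOn_ne_nil ',' _ (by simp))))),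
          join_stage '"' _ (flatMap_splitOn_ne_nil '/' _
              (flatMap_splitOn_ne_nil ':' _ (flatMap_splitOn_ne_nil ',' _ (by simp)))),
          join_stage '/' _ (flatMap_splitOn_ne_nil ':' _
              (flatMap_splitOn_ne_nil ',' _ (by simp))),
          join_stage ':' _ (flatMap_splitOn_ne_nil ',' _ (by simp)),
          join_stage ',' _ (by simp)]
        simp [PySem.Chars.join_singleton]
      have hc : ("," : String).toList = [','] := rfl
      have hco : (":" : String).toList = [':'] := rfl
      have hsl : ("/" : String).toList = ['/'] := rfl
      have hq : ("\"" : String).toList = ['"'] := rfl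
      have hb : ("|" : String).toList = ['|'] := rfl
      have hspc : (" " : String).toList = [' '] := rfl
      simp only [PySem.Str.replace, PySem.Str.lstrip, PySem.Str.rstrip, PySem.Chars.strip,
        String.toList_ofList, hc, hco, hsl, hq, hb, hspc, replace_single, hfold]
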